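-- pv_equiv track=rewrite | github.com/944613709/Pku2024-BigData | auto_create_hive_table/cn/pku/utils/TableNameUtil.py | getODSTableNameList
-- ===== SOURCE A (Python) =====
-- def getODSTableNameList(fileNameList):
--     """
--     基于传递的所有表名，将增量表与全量表进行划分到不同的列表中
--     :param fileNameList: 所有表名的列表
--     :return: 增量与全量列表
--     """
--     # 定义全量空列表
--     full_list = []
--     # 定义增量空列表
--     incr_list = []
--     # 用于返回的结果列表
--     result_list = []
--     # 定义一个bool值，默认为true
--     isFull = True
--     # 取出集合中的每一个表名
--     for line in fileNameList:
--         # 如果isFull = True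
--         if isFull:
--             # 如果当前取到的表名为@
--             if "@".__eq__(line):
--                 # 将 isFull = False
--                 isFull = False
--                 # 跳过本次循环
--                 continue
--             # 将表名放入全量表的列表中
--             full_list.append(line)
--         # 如果isFull = False
--         else:
--             # 将表名放入增量列表
--             incr_list.append(line)
--     # 将全量列表和增量列表放入一个结果列表中
--     result_list.append(full_list)
--     result_list.append(incr_list)
--     # 返回结果列表
--     return result_list
-- ===== SOURCE B (Python) =====
-- def getODSTableNameList(fileNameList):
--     if "@" in fileNameList:
--         idx = fileNameList.index("@")
--         return [fileNameList[:idx], fileNameList[idx + 1:]]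
--     return [list(fileNameList), []]
-- ===== Notes on version B (the rewrite author's own statement) =====
-- stated objective: simpler
-- what changed: Replaces the boolean-toggling per-element accumulation loop with locate-then-slice: find the index of '@' and return the two slices around it (or the whole list and an empty list if '@' is absent).
import Mathlib
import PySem

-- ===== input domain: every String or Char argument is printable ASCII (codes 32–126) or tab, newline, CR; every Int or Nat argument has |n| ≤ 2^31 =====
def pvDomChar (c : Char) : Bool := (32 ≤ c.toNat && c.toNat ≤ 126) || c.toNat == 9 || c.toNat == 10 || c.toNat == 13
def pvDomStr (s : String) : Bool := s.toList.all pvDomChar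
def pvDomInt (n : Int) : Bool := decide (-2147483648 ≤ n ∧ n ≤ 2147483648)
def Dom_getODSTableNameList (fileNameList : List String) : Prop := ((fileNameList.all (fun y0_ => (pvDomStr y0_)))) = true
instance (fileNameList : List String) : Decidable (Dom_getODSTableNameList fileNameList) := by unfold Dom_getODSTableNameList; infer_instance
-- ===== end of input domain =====

-- ===== PORT A =====
-- B replaces A's boolean-toggling accumulation loop with locate-then-slice for simplicity; equivalence proved on all inputs.
-- literal transliteration of A: fold over the list carrying (full_list, incr_list, isFull)
def pvLoopA : List String → List String → List String → Bool → List String × List String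
  | [], full, incr, _ => (full, incr)
  | line :: rest, full, incr, isFull =>
    if isFull then
      if line == "@" then pvLoopA rest full incr false
      else pvLoopA rest (full ++ [line]) incr true
    else pvLoopA rest full (incr ++ [line]) false

def getODSTableNameList (fileNameList : List String) : List (List String) :=
  let r := pvLoopA fileNameList [] [] true
  [r.1, r.2]

-- ===== PORT B =====
def getODSTableNameList_alt (fileNameList : List String) : List (List String) :=
  if "@" ∈ fileNameList then
    match PySem.List.index? fileNameList "@" with
    | some idx =>
        [PySem.List.slice fileNameList none (some (idx : Int)),
         PySem.List.slice fileNameList (some ((idx : Int) + 1)) none]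
    | none => []  -- unreachable: "@" ∈ fileNameList
  else [fileNameList, []]

-- ===== PRECONDITION & SPEC =====
def Spec_getODSTableNameList (fileNameList : List String) (out : List (List String)) : Prop := out = getODSTableNameList_alt fileNameList
instance (fileNameList : List String) (out : List (List String)) : Decidable (Spec_getODSTableNameList fileNameList out) := by unfold Spec_getODSTableNameList; infer_instance

-- ===== CLAIM (what is proved, stated in full; the proofs are below) =====
def Claim_equal_getODSTableNameList : Prop := ∀ (fileNameList : List String), Dom_getODSTableNameList fileNameList → Spec_getODSTableNameList fileNameList (getODSTableNameList fileNameList)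

-- ===== LEMMAS AND PROOFS =====

-- ===== VERDICT (by name: the statement is the Claim_ definition above) =====
-- loop characterisation: with isFull=true, the loop splits at the first "@"
lemma pvLoopA_false (l full incr : List String) :
    pvLoopA l full incr false = (full, incr ++ l) := by
  induction l generalizing incr with
  | nil => simp [pvLoopA]
  | cons x xs ih => simp [pvLoopA, ih]

lemma pvLoopA_true (l full : List String) :
    pvLoopA l full [] true =
      (full ++ l.takeWhile (· ≠ "@"), (l.dropWhile (· ≠ "@")).tail) := by
  induction l generalizing full with
  | nil => simp [pvLoopA]
  | cons x xs ih =>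
    by_cases hx : x = "@"
    · subst hx; simp [pvLoopA, pvLoopA_false, List.takeWhile, List.dropWhile]
    · simp [pvLoopA, hx, ih, List.takeWhile, List.dropWhile]

lemma takeWhile_pre (pre suf : List String) (hpre : "@" ∉ pre) :
    (pre ++ "@" :: suf).takeWhile (· ≠ "@") = pre := by
  induction pre with
  | nil => simp [List.takeWhile]
  | cons y ys ih =>
    have hy : y ≠ "@" := by intro hy; exact hpre (by simp [hy])
    have h2 := ih (fun hm => hpre (List.mem_cons_of_mem _ hm))
    simpa [List.takeWhile_cons, hy] using h2

lemma dropWhile_pre (pre suf : List String) (hpre : "@" ∉ pre) :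
    (pre ++ "@" :: suf).dropWhile (· ≠ "@") = "@" :: suf := by
  induction pre with
  | nil => simp [List.dropWhile]
  | cons y ys ih =>
    have hy : y ≠ "@" := by intro hy; exact hpre (by simp [hy])
    have h2 := ih (fun hm => hpre (List.mem_cons_of_mem _ hm))
    simpa [List.dropWhile_cons, hy] using h2

lemma index?_take_drop (l : List String) (k : Nat)
    (h : PySem.List.index? l "@" = some k) :
    l.takeWhile (· ≠ "@") = l.take k ∧ (l.dropWhile (· ≠ "@")).tail = l.drop (k + 1) := by
  obtain ⟨pre, suf, rfl, rfl, hpre⟩ := (PySem.List.index?_eq_some_iff _ _ _).mp h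
  refine ⟨?_, ?_⟩
  · rw [takeWhile_pre pre suf hpre, List.take_left]
  · rw [dropWhile_pre pre suf hpre]
    have h1 : pre.length + 1 = (pre ++ ["@"]).length := by simp
    have h2 : pre ++ "@" :: suf = (pre ++ ["@"]) ++ suf := by simp
    rw [h1, h2, List.drop_left]
    simp

theorem getODSTableNameList_spec : Claim_equal_getODSTableNameList := by
  intro l _
  unfold Spec_getODSTableNameList getODSTableNameList getODSTableNameList_alt
  by_cases h : "@" ∈ l
  · obtain ⟨k, hk⟩ := Option.isSome_iff_exists.mp
      ((PySem.List.index?_isSome_iff _ _).mpr h)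
    obtain ⟨h1, h2⟩ := index?_take_drop l k hk
    have hc : ((k : Int) + 1) = ((k + 1 : Nat) : Int) := by push_cast; ring
    simp only [h, if_pos, hk, pvLoopA_true, List.nil_append]
    rw [hc, PySem.List.slice_to_natCast, PySem.List.slice_from_natCast]
    simp only [ne_eq, decide_not] at h1 h2
    simp [h1, h2]
  · have hdw : l.dropWhile (· ≠ "@") = [] := by
      rw [List.dropWhile_eq_nil_iff]
      intro x hx; simp; rintro rfl; exact h hx
    have ht : l.takeWhile (· ≠ "@") = l := by
      rw [List.takeWhile_eq_self_iff]
      intro x hx; simp; rintro rfl; exact h hx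
    simp only [h, pvLoopA_true, List.nil_append, ite_false]
    rw [ht, hdw]
    simp
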